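-- pv_equiv track=rewrite | github.com/pypi-data/pypi-mirror-401 | packages/qpane/qpane-1.2.1.tar.gz/qpane-1.2.1/tests/test_swap_responsiveness.py | _parse_prefetch_counts
-- ===== SOURCE A (Python) =====
-- def _parse_prefetch_counts(value: str) -> tuple[int | None, int | None]:
--     """Extract mask and predictor counts from a diagnostics row."""
--     mask_count: int | None = None
--     predictor_count: int | None = None
--     for part in value.split(" | "):
--         if "=" not in part:
--             continue
--         key, raw = part.split("=", 1)
--         try:
--             count = int(raw)
--         except ValueError:
--             continue
--         if key == "mask_prefetch":
--             mask_count = count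
--         elif key == "predictors":
--             predictor_count = count
--     return mask_count, predictor_count
-- ===== SOURCE B (Python) =====
-- def _parse_prefetch_counts(value: str) -> tuple[int | None, int | None]:
--     """Extract mask and predictor counts from a diagnostics row."""
--     parts = value.split(" | ")[::-1]
--
--     def first_valid(key: str) -> int | None:
--         for part in parts:
--             head, sep, tail = part.partition("=")
--             if sep and head == key:
--                 try:
--                     return int(tail)
--                 except ValueError:
--                     pass
--         return None
--
--     return first_valid("mask_prefetch"), first_valid("predictors")
-- ===== Notes on version B (the rewrite author's own statement) =====
-- stated objective: alternative
-- what changed: B replaces A's single forward pass that accumulates two scalar variables by two independent backward searches over the reversed part list, each returning early at the first part whose key matches and whose value parses as int (last-valid-wins by construction).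
import Mathlib
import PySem

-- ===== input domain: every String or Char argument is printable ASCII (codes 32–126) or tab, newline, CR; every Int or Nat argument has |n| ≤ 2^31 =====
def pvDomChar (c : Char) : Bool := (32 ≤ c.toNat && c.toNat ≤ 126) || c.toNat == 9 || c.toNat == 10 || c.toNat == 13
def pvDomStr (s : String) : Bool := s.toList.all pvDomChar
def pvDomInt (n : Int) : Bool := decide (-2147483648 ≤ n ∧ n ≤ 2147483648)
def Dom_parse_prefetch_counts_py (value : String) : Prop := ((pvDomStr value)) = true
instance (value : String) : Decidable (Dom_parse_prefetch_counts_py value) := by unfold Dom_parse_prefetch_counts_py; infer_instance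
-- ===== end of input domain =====

-- B replaces A's single forward accumulation pass by two independent backward searches
-- (reversed part list, early return at the first key match with a valid int) — alternative decomposition, same cost.


-- ===== PORT A =====
def parse_prefetch_counts_py (value : String) : Option Int × Option Int :=
  ((PySem.Str.split? value " | ").getD []).foldl
    (fun (acc : Option Int × Option Int) part =>
      if PySem.Str.isIn "=" part then
        -- key, raw = part.split("=", 1): "=" in part guarantees exactly two pieces
        let pieces := (PySem.Str.splitMax? part "=" 1).getD []
        let key := pieces.getD 0 ""
        let raw := pieces.getD 1 ""
        match PySem.Int.ofStr? raw with
        | none => acc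
        | some count =>
          if key == "mask_prefetch" then (some count, acc.2)
          else if key == "predictors" then (acc.1, some count)
          else acc
      else acc)
    (none, none)

-- ===== PORT B =====
-- exact port of str.partition("="): (head, "=", tail) at the first "=", else (s, "", "")
def pyPartitionEq (s : String) : String × String × String :=
  if PySem.Str.isIn "=" s then
    let pieces := (PySem.Str.splitMax? s "=" 1).getD []
    (pieces.getD 0 "", "=", pieces.getD 1 "")
  else (s, "", "")

-- the inner 'for part in parts: … return int(tail) …' loop of Source B's first_valid(key)
def firstValid (key : String) : List String → Option Int
  | [] => none
  | part :: rest =>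
    let kr := pyPartitionEq part
    if kr.2.1 != "" && kr.1 == key then
      match PySem.Int.ofStr? kr.2.2 with
      | some c => some c
      | none => firstValid key rest
    else firstValid key rest

def parse_prefetch_counts_py_alt (value : String) : Option Int × Option Int :=
  -- parts = value.split(" | ")[::-1]
  let parts := (PySem.List.slice? ((PySem.Str.split? value " | ").getD []) none none (-1)).getD []
  (firstValid "mask_prefetch" parts, firstValid "predictors" parts)

-- ===== PRECONDITION & SPEC =====
def Spec_parse_prefetch_counts_py (value : String) (out : Option Int × Option Int) : Prop := out = parse_prefetch_counts_py_alt value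
instance (value : String) (out : Option Int × Option Int) : Decidable (Spec_parse_prefetch_counts_py value out) := by unfold Spec_parse_prefetch_counts_py; infer_instance

-- ===== CLAIM (what is proved, stated in full; the proofs are below) =====
def Claim_equal_parse_prefetch_counts_py : Prop := ∀ (value : String), Dom_parse_prefetch_counts_py value → Spec_parse_prefetch_counts_py value (parse_prefetch_counts_py value)

-- ===== LEMMAS AND PROOFS =====
-- A's loop body, named so the induction can rewrite it
def astep (acc : Option Int × Option Int) (part : String) : Option Int × Option Int :=
  if PySem.Str.isIn "=" part then
    let pieces := (PySem.Str.splitMax? part "=" 1).getD []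
    let key := pieces.getD 0 ""
    let raw := pieces.getD 1 ""
    match PySem.Int.ofStr? raw with
    | none => acc
    | some count =>
      if key == "mask_prefetch" then (some count, acc.2)
      else if key == "predictors" then (acc.1, some count)
      else acc
  else acc

-- what one part contributes for one key, phrased through B's partition helper
def extract (key part : String) : Option Int :=
  let kr := pyPartitionEq part
  if kr.2.1 != "" && kr.1 == key then PySem.Int.ofStr? kr.2.2 else none

theorem firstValid_cons (key part : String) (rest : List String) :
    firstValid key (part :: rest) = (extract key part).or (firstValid key rest) := by
  simp only [firstValid, extract]
  by_cases h : ((pyPartitionEq part).2.1 != "" && (pyPartitionEq part).1 == key) = true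
  · simp only [h, if_true]
    cases PySem.Int.ofStr? (pyPartitionEq part).2.2 <;> simp [Option.or]
  · simp only [eq_false_of_ne_true h, Bool.false_eq_true, if_false, Option.none_or]

theorem firstValid_append_singleton (key : String) (l : List String) (p : String) :
    firstValid key (l ++ [p]) = (firstValid key l).or (extract key p) := by
  induction l with
  | nil => simp only [List.nil_append, firstValid_cons, firstValid, Option.or_none, Option.none_or]
  | cons q qs ih => simp only [List.cons_append, firstValid_cons, ih, Option.or_assoc]

theorem astep_eq (acc : Option Int × Option Int) (p : String) :
    astep acc p = ((extract "mask_prefetch" p).or acc.1, (extract "predictors" p).or acc.2) := by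
  simp only [astep, extract, pyPartitionEq]
  by_cases hin : PySem.Str.isIn "=" p = true
  · simp only [hin, if_true]
    cases hc : PySem.Int.ofStr? (((PySem.Str.splitMax? p "=" 1).getD []).getD 1 "") with
    | none => simp [hc]
    | some c =>
      simp only [hc]
      split_ifs <;> simp_all [Option.or]
  · simp only [eq_false_of_ne_true hin, Bool.false_eq_true, if_false]
    simp

theorem foldl_astep_eq (parts : List String) (acc : Option Int × Option Int) :
    parts.foldl astep acc =
      ((firstValid "mask_prefetch" parts.reverse).or acc.1,
       (firstValid "predictors" parts.reverse).or acc.2) := by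
  induction parts generalizing acc with
  | nil => simp [firstValid]
  | cons p ps ih =>
    simp only [List.foldl_cons, List.reverse_cons, ih, astep_eq,
      firstValid_append_singleton, Option.or_assoc]

-- ===== VERDICT (by name: the statement is the Claim_ definition above) =====
theorem parse_prefetch_counts_py_spec : Claim_equal_parse_prefetch_counts_py := by
  intro value _
  unfold Spec_parse_prefetch_counts_py parse_prefetch_counts_py parse_prefetch_counts_py_alt
  rw [PySem.List.slice?_none_none_neg_one]
  show List.foldl astep (none, none) _ = _
  rw [foldl_astep_eq]
  simp only [Option.getD_some, Option.or_none]
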